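-- pv_equiv track=rewrite | github.com/naisachetti/INE5421-GIRLS | Gramatica.py | spread_symbol_right
-- ===== SOURCE A (Python) =====
-- def spread_symbol_right(corte: list, inserido: str):
--     corte = corte.copy()
--     flag = False
--     for index, simbolo in enumerate(corte):
--         if flag:
--             flag = False
--             continue
--         if simbolo == "|":
--             corte.insert(index, inserido)
--             flag = True
--     corte.append(inserido)
--     return corte
-- ===== SOURCE B (Python) =====
-- def spread_symbol_right(corte: list, inserido: str):
--     # segmentation: cut at each "|", emit segment + inserido + "|", then the tail + inserido
--     out = []
--     rest = corte
--     while "|" in rest: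
--         k = rest.index("|")
--         out.extend(rest[:k])
--         out.append(inserido)
--         out.append("|")
--         rest = rest[k + 1:]
--     out.extend(rest)
--     out.append(inserido)
--     return out
-- ===== Notes on version B (the rewrite author's own statement) =====
-- stated objective: alternative
-- what changed: A mutates a copy while iterating (inserting before each '|' and skipping it with a flag); B never mutates: it segments the list at each '|' by repeatedly finding the first separator and assembling segment + inserido + '|' into a fresh output, then tail + inserido.
import Mathlib
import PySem

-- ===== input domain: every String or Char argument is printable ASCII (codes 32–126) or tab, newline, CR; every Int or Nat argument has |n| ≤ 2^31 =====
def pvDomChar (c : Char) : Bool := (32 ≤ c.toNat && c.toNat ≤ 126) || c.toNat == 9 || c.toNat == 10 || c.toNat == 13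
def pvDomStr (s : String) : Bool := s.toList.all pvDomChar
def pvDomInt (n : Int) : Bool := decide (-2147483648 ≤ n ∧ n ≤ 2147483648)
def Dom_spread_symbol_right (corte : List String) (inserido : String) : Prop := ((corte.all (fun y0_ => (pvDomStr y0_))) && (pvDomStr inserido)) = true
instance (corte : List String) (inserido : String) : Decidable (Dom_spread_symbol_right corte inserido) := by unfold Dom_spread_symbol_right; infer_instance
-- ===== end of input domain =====

-- B replaces A's mutate-while-iterating pass (insert + skip flag) by delimiter segmentation:
-- repeatedly find the first "|", emit the segment before it plus [inserido, "|"], and finish with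
-- the tail and a final inserido; built into a fresh list (A only mutates its private copy).

-- ===== PORT A =====
-- Python's `for index, simbolo in enumerate(corte)` iterates over the list A mutates in place:
-- the iterator keeps a cursor, re-reads the mutated list each step and stops when the cursor
-- reaches the current length; this recursion is that cursor loop, step for step.
def spreadLoopA (inserido : String) (corte : List String) (i : Nat) (flag : Bool) : List String :=
  if h : i < corte.length then
    let simbolo := corte[i]
    if hf : flag then
      spreadLoopA inserido corte (i + 1) false
    else if simbolo == "|" then
      spreadLoopA inserido (PySem.List.insert corte (i : Int) inserido) (i + 1) true
    else
      spreadLoopA inserido corte (i + 1) false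
  else corte
termination_by 2 * (corte.length - i) + (if flag then 0 else 1)
decreasing_by
  all_goals simp_all [PySem.List.length_insert]
  all_goals omega

def spread_symbol_right (corte : List String) (inserido : String) : List String :=
  spreadLoopA inserido corte 0 false ++ [inserido]

-- ===== PORT B =====
-- the `while "|" in rest` loop; state is (out, rest)
def altLoopB (inserido : String) (rest : List String) (out : List String) : List String × List String :=
  if h : "|" ∈ rest then
    -- `rest.index("|")` cannot raise here: "|" ∈ rest, so index? is `some`
    let k := (PySem.List.index? rest "|").getD 0
    altLoopB inserido (PySem.List.slice rest (some ((k + 1 : Nat) : Int)) none)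
      (out ++ PySem.List.slice rest none (some ((k : Nat) : Int)) ++ [inserido, "|"])
  else (out, rest)
termination_by rest.length
decreasing_by
  rw [PySem.List.slice_from_natCast]
  have := List.length_pos_of_mem h
  simp only [List.length_drop]; omega

def spread_symbol_right_alt (corte : List String) (inserido : String) : List String :=
  (altLoopB inserido corte []).1 ++ (altLoopB inserido corte []).2 ++ [inserido]

-- ===== PRECONDITION & SPEC =====
def Spec_spread_symbol_right (corte : List String) (inserido : String) (out : List String) : Prop := out = spread_symbol_right_alt corte inserido
instance (corte : List String) (inserido : String) (out : List String) : Decidable (Spec_spread_symbol_right corte inserido out) := by unfold Spec_spread_symbol_right; infer_instance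

-- ===== CLAIM (what is proved, stated in full; the proofs are below) =====
def Claim_equal_spread_symbol_right : Prop := ∀ (corte : List String) (inserido : String), Dom_spread_symbol_right corte inserido → Spec_spread_symbol_right corte inserido (spread_symbol_right corte inserido)

-- ===== LEMMAS AND PROOFS =====

-- the per-symbol expansion both programs realise
def segf (inserido : String) (x : String) : List String :=
  if x = "|" then [inserido, "|"] else [x]

theorem flatMap_segf_of_not_mem (inserido : String) (l : List String) (h : "|" ∉ l) :
    l.flatMap (segf inserido) = l := by
  induction l with
  | nil => rfl
  | cons x t ih =>
    simp only [List.mem_cons, not_or] at h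
    simp [segf, Ne.symm h.1, ih h.2]

theorem spreadLoopA_eq (inserido : String) :
    ∀ (d : Nat) (corte : List String) (i : Nat), corte.length - i = d →
      spreadLoopA inserido corte i false =
        corte.take i ++ (corte.drop i).flatMap (segf inserido) := by
  intro d
  induction d with
  | zero =>
    intro corte i hd
    rw [spreadLoopA]
    simp only [dif_neg (by omega : ¬ i < corte.length)]
    rw [List.drop_eq_nil_of_le (by omega), List.take_of_length_le (by omega)]
    simp
  | succ d ih =>
    intro corte i hd
    have hi : i < corte.length := by omega
    rw [spreadLoopA]
    simp only [dif_pos hi]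
    rw [dif_neg (by decide : ¬ false = true)]
    by_cases hs : corte[i] = "|"
    · rw [if_pos (by simp [hs])]
      set l' := PySem.List.insert corte (i : Int) inserido with hl'
      have hdrop : corte.drop i = "|" :: corte.drop (i + 1) := by
        rw [← hs]; exact (List.getElem_cons_drop hi).symm
      have hl'eq : l' = corte.take i ++ inserido :: "|" :: corte.drop (i + 1) := by
        rw [hl', PySem.List.insert_natCast corte i inserido (by omega), hdrop]
      have hA : (corte.take i).length = i := by simp; omega
      have hlen' : l'.length = corte.length + 1 := by rw [hl'eq]; simp; omega
      -- the flag step just advances the cursor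
      have hstep : spreadLoopA inserido l' (i + 1) true = spreadLoopA inserido l' (i + 2) false := by
        rw [spreadLoopA]
        rw [dif_pos (by omega : i + 1 < l'.length), dif_pos rfl]
      rw [hstep, ih l' (i + 2) (by omega)]
      have htake : l'.take (i + 2) = corte.take i ++ [inserido, "|"] := by
        rw [hl'eq, show i + 2 = (corte.take i).length + 2 by omega,
          List.take_length_add_append]
        rfl
      have hdrop' : l'.drop (i + 2) = corte.drop (i + 1) := by
        rw [hl'eq, show i + 2 = (corte.take i).length + 2 by omega,
          List.drop_length_add_append]
        rfl
      rw [htake, hdrop', hdrop]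
      simp [segf]
    · rw [if_neg (by simp [hs])]
      rw [ih corte (i + 1) (by omega)]
      have hdrop : corte.drop i = corte[i] :: corte.drop (i + 1) :=
        (List.getElem_cons_drop hi).symm
      have htake : corte.take (i + 1) = corte.take i ++ [corte[i]] := by
        rw [List.take_add_one, List.getElem?_eq_getElem hi]; rfl
      rw [htake, hdrop]
      simp only [segf, if_neg hs, List.flatMap_cons, List.append_assoc, List.singleton_append]

theorem altLoopB_eq (inserido : String) :
    ∀ (d : Nat) (rest : List String), rest.length = d → ∀ (out : List String),
      (altLoopB inserido rest out).1 ++ (altLoopB inserido rest out).2 =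
        out ++ rest.flatMap (segf inserido) := by
  intro d
  induction d using Nat.strong_induction_on with
  | _ d ih =>
    intro rest hd out
    by_cases hm : "|" ∈ rest
    · obtain ⟨k, hk⟩ := Option.isSome_iff_exists.mp ((PySem.List.index?_isSome_iff rest "|").mpr hm)
      obtain ⟨pre, suf, hrest, hklen, hpre⟩ := (PySem.List.index?_eq_some_iff rest "|" k).mp hk
      have htake : PySem.List.slice rest none (some ((k : Nat) : Int)) = pre := by
        rw [PySem.List.slice_to_natCast, hrest, ← hklen, List.take_left]
      have hdrop : PySem.List.slice rest (some ((k + 1 : Nat) : Int)) none = suf := by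
        rw [PySem.List.slice_from_natCast, hrest, ← hklen,
          show pre.length + 1 = pre.length + 1 from rfl, List.drop_length_add_append]
        rfl
      rw [altLoopB]
      simp only [dif_pos hm, hk, Option.getD_some, htake, hdrop]
      rw [ih suf.length (by rw [← hd, hrest]; simp; omega) suf rfl]
      rw [hrest, List.flatMap_append, flatMap_segf_of_not_mem inserido pre hpre]
      simp [segf, List.append_assoc]
    · rw [altLoopB]
      simp only [dif_neg hm]
      rw [flatMap_segf_of_not_mem inserido rest hm]

-- ===== VERDICT (by name: the statement is the Claim_ definition above) =====
theorem spread_symbol_right_spec : Claim_equal_spread_symbol_right := by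
  intro corte inserido _
  unfold Spec_spread_symbol_right spread_symbol_right spread_symbol_right_alt
  rw [spreadLoopA_eq inserido (corte.length) corte 0 (by omega)]
  rw [altLoopB_eq inserido corte.length corte rfl []]
  simp
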